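-- pv_equiv track=rewrite | github.com/fosfrancesco/chromaflow | src/utils.py | counterOfElementsInChord
-- ===== SOURCE A (Python) =====
-- def counterOfElementsInChord(song):
--     add = 0
--     counter = [0, 0] #first two element are <style> and the actual style
--     for i in range(2, len(song)):
--         e = song[i]
--         if e == '<start>' or e == '<end>' or e == '<pad>' or e == '.':
--             add = 0
--             counter.append(add)
--         else:
--             add += 1
--             counter.append(add)
--     return counter
-- ===== SOURCE B (Python) =====
-- SEPARATORS = ('<start>', '<end>', '<pad>', '.')
--
--
-- def counterOfElementsInChord(song):
--     out = [0, 0]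
--     n = len(song)
--     i = 2
--     while i < n:
--         sep = song[i] in SEPARATORS
--         j = i + 1
--         while j < n and (song[j] in SEPARATORS) == sep:
--             j += 1
--         out.extend([0] * (j - i) if sep else range(1, j - i + 1))
--         i = j
--     return out
-- ===== Notes on version B (the rewrite author's own statement) =====
-- stated objective: alternative
-- what changed: B processes maximal runs of separator/non-separator tokens at once, emitting [0]*run or range(1,run+1) per run, instead of A's per-element loop maintaining a running counter.
import Mathlib
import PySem

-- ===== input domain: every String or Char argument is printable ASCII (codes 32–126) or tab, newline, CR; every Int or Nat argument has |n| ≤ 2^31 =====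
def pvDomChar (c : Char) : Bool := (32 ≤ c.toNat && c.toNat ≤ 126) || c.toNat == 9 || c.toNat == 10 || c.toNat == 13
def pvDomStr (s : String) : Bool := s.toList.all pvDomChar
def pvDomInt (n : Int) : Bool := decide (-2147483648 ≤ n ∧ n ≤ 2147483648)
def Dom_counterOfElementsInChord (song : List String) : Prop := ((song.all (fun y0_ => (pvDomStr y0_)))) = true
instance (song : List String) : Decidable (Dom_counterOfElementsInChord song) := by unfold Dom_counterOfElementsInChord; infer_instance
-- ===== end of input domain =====

-- B rewrites A's per-element running-counter loop as run-based processing (same cost, alternative decomposition).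

-- ===== PORT A =====
def counterOfElementsInChord (song : List String) : List Int :=
  let st :=
    (PySem.List.pyRange 2 (PySem.List.len song) 1).foldl
      (fun (s : Int × List Int) i =>
        let e := PySem.List.pyGetD song i ""
        if e = "<start>" ∨ e = "<end>" ∨ e = "<pad>" ∨ e = "." then
          (0, s.2 ++ [(0 : Int)])
        else
          (s.1 + 1, s.2 ++ [s.1 + 1]))
      (0, [0, 0])
  st.2

-- ===== PORT B =====
def isSepB (e : String) : Bool :=
  decide (e = "<start>" ∨ e = "<end>" ∨ e = "<pad>" ∨ e = ".")

-- length of the inner while loop's run minus the first element: counts the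
-- leading elements of t whose separator status equals sep
def runCountB (sep : Bool) : List String → Nat
  | [] => 0
  | x :: t => if isSepB x = sep then runCountB sep t + 1 else 0

def segB : List String → List Int
  | [] => []
  | e :: t =>
    let sep := isSepB e
    let run := 1 + runCountB sep t
    (if sep then List.replicate run (0 : Int)
     else (List.range run).map (fun (k : Nat) => (k : Int) + 1))
      ++ segB (t.drop (runCountB sep t))
termination_by l => l.length
decreasing_by
  simp only [List.length_cons, List.length_drop]
  omega

def counterOfElementsInChord_alt (song : List String) : List Int :=
  [0, 0] ++ segB (PySem.List.slice song (some 2) none)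

-- ===== PRECONDITION & SPEC =====
def Spec_counterOfElementsInChord (song : List String) (out : List Int) : Prop := out = counterOfElementsInChord_alt song
instance (song : List String) (out : List Int) : Decidable (Spec_counterOfElementsInChord song out) := by unfold Spec_counterOfElementsInChord; infer_instance

-- ===== CLAIM (what is proved, stated in full; the proofs are below) =====
def Claim_equal_counterOfElementsInChord : Prop := ∀ (song : List String), Dom_counterOfElementsInChord song → Spec_counterOfElementsInChord song (counterOfElementsInChord song)

-- ===== LEMMAS AND PROOFS =====

-- A's per-element behaviour as a recursive function of the running counter
def segA (add : Int) : List String → List Int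
  | [] => []
  | e :: t =>
    if isSepB e then (0 : Int) :: segA 0 t else (add + 1) :: segA (add + 1) t

lemma foldl_segA (l : List String) (add : Int) (acc : List Int) :
    (l.foldl
      (fun (s : Int × List Int) e =>
        if e = "<start>" ∨ e = "<end>" ∨ e = "<pad>" ∨ e = "." then
          (0, s.2 ++ [(0 : Int)])
        else
          (s.1 + 1, s.2 ++ [s.1 + 1]))
      (add, acc)).2 = acc ++ segA add l := by
  induction l generalizing add acc with
  | nil => simp [segA]
  | cons e t ih =>
    by_cases h : isSepB e = true
    · have h' : e = "<start>" ∨ e = "<end>" ∨ e = "<pad>" ∨ e = "." := by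
        simpa [isSepB] using h
      simp [segA, h, h', ih]
    · have h' : ¬(e = "<start>" ∨ e = "<end>" ∨ e = "<pad>" ∨ e = ".") := by
        simpa [isSepB] using h
      simp [segA, h, h', ih]

lemma segA_sep_absorb (t : List String) :
    segA 0 t = List.replicate (runCountB true t) (0 : Int)
      ++ segA 0 (t.drop (runCountB true t)) := by
  induction t with
  | nil => simp [runCountB]
  | cons x t ih =>
    by_cases h : isSepB x = true
    · simp [runCountB, h, segA, ih, List.replicate_succ]
    · simp [runCountB, h]

lemma segA_nonsep_absorb (t : List String) (c : Int) :
    segA c t = (List.range (runCountB false t)).map (fun (k : Nat) => c + 1 + (k : Int))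
      ++ segA 0 (t.drop (runCountB false t)) := by
  induction t generalizing c with
  | nil => simp [runCountB, segA]
  | cons x t ih =>
    by_cases h : isSepB x = true
    · have hr : runCountB false (x :: t) = 0 := by simp [runCountB, h]
      simp [hr, segA, h]
    · have h0 : isSepB x = false := by simpa using h
      have hr : runCountB false (x :: t) = runCountB false t + 1 := by
        simp [runCountB, h0]
      rw [hr, List.range_succ_eq_map, List.drop_succ_cons]
      simp only [segA, h0, Bool.false_eq_true, if_false]
      rw [ih (c + 1)]
      simp only [List.map_map, List.map_cons, List.cons_append, Function.comp_def]
      congr 1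
      · push_cast; ring
      · congr 1
        apply List.map_congr_left
        intro k _
        push_cast [Nat.succ_eq_add_one]
        ring

lemma segB_eq_segA : ∀ (l : List String), segB l = segA 0 l
  | [] => by simp [segB, segA]
  | e :: t => by
    rw [segB]
    by_cases h : isSepB e = true
    · have hrec := segB_eq_segA (t.drop (runCountB (isSepB e) t))
      rw [hrec, h]
      simp only [if_true]
      rw [show (1 + runCountB true t) = runCountB true t + 1 from Nat.add_comm _ _,
        List.replicate_succ]
      have : segA 0 (e :: t) = (0 : Int) :: segA 0 t := by simp [segA, h]
      rw [this, segA_sep_absorb t]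
      simp
    · have h0 : isSepB e = false := by simpa using h
      have hrec := segB_eq_segA (t.drop (runCountB (isSepB e) t))
      rw [hrec, h0]
      simp only [Bool.false_eq_true, if_false]
      have habs := segA_nonsep_absorb (e :: t) 0
      have hr : runCountB false (e :: t) = runCountB false t + 1 := by
        simp [runCountB, h0]
      rw [hr, List.drop_succ_cons] at habs
      rw [habs]
      congr 1
      rw [show (1 + runCountB false t) = runCountB false t + 1 from Nat.add_comm _ _]
      apply List.map_congr_left
      intro k _
      ring
termination_by l => l.length
decreasing_by
  all_goals
    simp only [List.length_cons, List.length_drop]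
    omega

lemma slice_two (song : List String) :
    PySem.List.slice song (some 2) none = song.drop 2 := by
  rw [show (2 : Int) = ((2 : Nat) : Int) by norm_num]
  exact PySem.List.slice_from_natCast song 2

theorem counterOfElementsInChord_spec : Claim_equal_counterOfElementsInChord := by
  intro song _
  show counterOfElementsInChord song = counterOfElementsInChord_alt song
  show counterOfElementsInChord song = counterOfElementsInChord_alt song
  unfold counterOfElementsInChord_alt
  rw [slice_two, segB_eq_segA]
  exact (congrArg Prod.snd (PySem.List.foldl_pyRange_pyGetD song ""
    (fun (s : Int × List Int) e =>
      if e = "<start>" ∨ e = "<end>" ∨ e = "<pad>" ∨ e = "." then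
        (0, s.2 ++ [(0 : Int)])
      else
        (s.1 + 1, s.2 ++ [s.1 + 1])) (0, [0, 0])
    (by norm_num : (0 : Int) ≤ 2))).trans (foldl_segA (song.drop 2) 0 [0, 0])
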